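-- pv_equiv track=rewrite | github.com/guillainbisimwa/competitive-programming | C_Erase_First_or_Second_Letter.py | count_distinct_strings
-- ===== SOURCE A (Python) =====
-- def count_distinct_strings(n, s):
--     # Count the frequency of each character in the string
--     freq = {}
--     for char in s:
--         freq[char] = freq.get(char, 0) + 1
--
--     # Calculate the number of distinct non-empty strings
--     distinct_strings = 0
--     for char, count in freq.items():
--         # Add the count of substrings of length 1
--         distinct_strings += count
--
--         # Add the count of substrings of length 2
--         distinct_strings += count * (count - 1) // 2
--
--     return distinct_strings
-- ===== SOURCE B (Python) =====
-- def count_distinct_strings(n, s):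
--     # Sort the characters and scan consecutive equal runs; a run of length c
--     # contributes c*(c+1)//2 (c singles plus c*(c-1)//2 pairs).
--     t = sorted(s)
--     total = 0
--     i = 0
--     m = len(t)
--     while i < m:
--         j = i + 1
--         while j < m and t[j] == t[i]:
--             j += 1
--         c = j - i
--         total += c * (c + 1) // 2
--         i = j
--     return total
-- ===== Notes on version B (the rewrite author's own statement) =====
-- stated objective: alternative
-- what changed: Replaces the hash-map character-frequency pass followed by a dict-items sum with sort-then-scan: sort the characters and walk consecutive equal runs, adding the triangular number c*(c+1)//2 per run; no dictionary is maintained.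
import Mathlib
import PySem

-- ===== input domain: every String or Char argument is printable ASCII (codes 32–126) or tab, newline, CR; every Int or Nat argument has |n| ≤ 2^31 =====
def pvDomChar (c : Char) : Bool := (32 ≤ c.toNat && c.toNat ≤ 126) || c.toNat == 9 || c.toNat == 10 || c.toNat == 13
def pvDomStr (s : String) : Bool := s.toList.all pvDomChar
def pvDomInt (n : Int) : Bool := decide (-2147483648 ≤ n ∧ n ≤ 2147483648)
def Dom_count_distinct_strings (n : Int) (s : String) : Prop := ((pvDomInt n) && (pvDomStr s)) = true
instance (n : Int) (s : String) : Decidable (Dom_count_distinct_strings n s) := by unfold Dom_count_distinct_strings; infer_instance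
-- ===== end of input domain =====

-- B replaces A's hash-map frequency count + dict-items sum by sort-then-scan over
-- consecutive equal runs (same result, a genuinely different traversal; no speed claim).

-- ===== PORT A =====
-- freq = {}; for char in s: freq[char] = freq.get(char, 0) + 1
-- then sum over freq.items() of count + count*(count-1)//2
def count_distinct_strings (n : Int) (s : String) : Int :=
  let freq := s.toList.foldl (fun d ch => d.insert ch (d.getD ch 0 + 1))
    (PySem.Dict.empty : PySem.Dict Char Int)
  freq.items.foldl
    (fun acc p => acc + p.2 + PySem.Int.floordiv (p.2 * (p.2 - 1)) 2) 0

-- ===== PORT B =====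
-- the outer while loop of Source B: consume one run of equal characters
-- (the inner 'while t[j] == t[i]' scan is the takeWhile/dropWhile of the run),
-- add c*(c+1)//2 for its length c, continue after the run
def pvRunScan : List Char → Int
  | [] => 0
  | c :: cs =>
    let run : Int := 1 + (cs.takeWhile (· == c)).length
    PySem.Int.floordiv (run * (run + 1)) 2 + pvRunScan (cs.dropWhile (· == c))
termination_by l => l.length
decreasing_by
  simp only [List.length_cons]
  exact Nat.lt_succ_of_le (List.length_dropWhile_le _ _)

def count_distinct_strings_alt (n : Int) (s : String) : Int :=
  pvRunScan (PySem.List.sorted s.toList (fun x => x) false)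

-- ===== PRECONDITION & SPEC =====
def Spec_count_distinct_strings (n : Int) (s : String) (out : Int) : Prop := out = count_distinct_strings_alt n s
instance (n : Int) (s : String) (out : Int) : Decidable (Spec_count_distinct_strings n s out) := by unfold Spec_count_distinct_strings; infer_instance

-- ===== CLAIM (what is proved, stated in full; the proofs are below) =====
def Claim_equal_count_distinct_strings : Prop := ∀ (n : Int) (s : String), Dom_count_distinct_strings n s → Spec_count_distinct_strings n s (count_distinct_strings n s)

-- ===== LEMMAS AND PROOFS =====

-- c + c*(c-1)//2 = c*(c+1)//2 (A's per-character term equals B's triangular term)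
theorem pv_tri_eq (m : Int) :
    m + PySem.Int.floordiv (m * (m - 1)) 2 = PySem.Int.floordiv (m * (m + 1)) 2 := by
  rw [PySem.Int.floordiv_eq_ediv_of_pos (show (0:Int) < 2 by omega),
    PySem.Int.floordiv_eq_ediv_of_pos (show (0:Int) < 2 by omega)]
  obtain ⟨k, hk⟩ : Even (m * (m - 1)) := Int.even_mul_pred_self m
  have h2 : m * (m + 1) = (k + k) + (m + m) := by nlinarith [hk]
  rw [hk, h2]; omega

-- on a sorted list, the per-distinct-character triangular sum is the run scan
theorem pv_runscan_sorted :
    ∀ t : List Char, t.Pairwise (· ≤ ·) →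
      ((PySem.Set.ofList t).map
        (fun k => PySem.Int.floordiv ((t.count k : Int) * ((t.count k : Int) + 1)) 2)).sum
        = pvRunScan t := by
  intro t
  induction t using pvRunScan.induct with
  | case1 => intro _; simp [pvRunScan, PySem.Set.ofList]
  | case2 c cs ih =>
    intro h
    have hw : ∀ b ∈ cs.takeWhile (· == c), b = c := by
      intro b hb
      have hpb : (b == c) = true := List.mem_takeWhile_imp (p := fun x => x == c) hb
      exact eq_of_beq hpb
    have hcs : cs.takeWhile (· == c) ++ cs.dropWhile (· == c) = cs :=
      List.takeWhile_append_dropWhile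
    have hle : ∀ x ∈ cs, c ≤ x := (List.pairwise_cons.mp h).1
    have hrs : (cs.dropWhile (· == c)).Pairwise (· ≤ ·) :=
      List.Pairwise.sublist (List.dropWhile_sublist _) (List.pairwise_cons.mp h).2
    -- c does not occur after its run
    have hcr : c ∉ cs.dropWhile (· == c) := by
      rcases hr : cs.dropWhile (· == c) with _ | ⟨d, ds⟩
      · simp
      · have hhd := List.head?_dropWhile_not (· == c) cs
        rw [hr] at hhd
        simp only [List.head?_cons] at hhd
        have hdc : d ≠ c := by simpa using hhd
        have hrs' := hrs; rw [hr] at hrs'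
        have hdds : ∀ x ∈ ds, d ≤ x := (List.pairwise_cons.mp hrs').1
        have hcd : c < d := by
          have : d ∈ cs := (List.dropWhile_sublist (· == c)).mem (by rw [hr]; exact List.mem_cons_self)
          exact lt_of_le_of_ne (hle d this) (Ne.symm hdc)
        intro hmem
        rcases List.mem_cons.mp hmem with h1 | h1
        · exact hdc h1.symm
        · exact absurd (lt_of_lt_of_le hcd (hdds c h1)) (lt_irrefl c)
    have hwrep : cs.takeWhile (· == c) =
        List.replicate (cs.takeWhile (· == c)).length c := List.eq_replicate_of_mem hw
    -- counts in the whole list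
    have hcount_c : (c :: cs).count c = (cs.takeWhile (· == c)).length + 1 := by
      rw [List.count_cons_self, ← hcs, List.count_append]
      rw [List.count_eq_zero.mpr hcr]
      conv_lhs => rw [hwrep]
      simp
    have hcount_ne : ∀ k, k ≠ c → (c :: cs).count k = (cs.dropWhile (· == c)).count k := by
      intro k hk
      rw [List.count_cons_of_ne (Ne.symm hk), ← hcs, List.count_append]
      conv_lhs => rw [hwrep]
      simp [List.count_replicate, Ne.symm hk]
    -- the distinct elements after removing c are those of the tail after the run
    have hperm : ((PySem.Set.ofList cs).discard c).Perm
        (PySem.Set.ofList (cs.dropWhile (· == c))) := by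
      rw [List.perm_ext_iff_of_nodup
        (PySem.Set.nodup_discard _ _ (PySem.Set.nodup_ofList cs))
        (PySem.Set.nodup_ofList _)]
      intro a
      rw [PySem.Set.mem_discard, PySem.Set.mem_ofList, PySem.Set.mem_ofList]
      constructor
      · rintro ⟨ha, hac⟩
        rw [← hcs] at ha
        rcases List.mem_append.mp ha with h1 | h1
        · exact absurd (hw a h1) hac
        · exact h1
      · intro ha
        refine ⟨?_, fun hac => hcr (hac ▸ ha)⟩
        rw [← hcs]; exact List.mem_append.mpr (Or.inr ha)
    -- put it together
    have hmapeq : ∀ a ∈ (PySem.Set.ofList cs).discard c,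
        PySem.Int.floordiv (((c :: cs).count a : Int) * (((c :: cs).count a : Int) + 1)) 2
          = PySem.Int.floordiv (((cs.dropWhile (· == c)).count a : Int)
              * (((cs.dropWhile (· == c)).count a : Int) + 1)) 2 := by
      intro a ha
      have hac : a ≠ c := ((PySem.Set.mem_discard _ _ _).mp ha).2
      rw [hcount_ne a hac]
    rw [PySem.Set.ofList_cons, List.map_cons, List.sum_cons]
    rw [List.map_congr_left hmapeq]
    rw [(hperm.map _).sum_eq, ih hrs]
    rw [pvRunScan, hcount_c]
    push_cast
    ring_nf

-- A's value is the triangular sum over the distinct characters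
theorem pv_A_eq_sum (n : Int) (s : String) :
    count_distinct_strings n s =
      ((PySem.Set.ofList s.toList).map
        (fun k => PySem.Int.floordiv ((s.toList.count k : Int) * ((s.toList.count k : Int) + 1)) 2)).sum := by
  show (s.toList.foldl (fun d ch => d.insert ch (d.getD ch 0 + 1))
          (PySem.Dict.empty : PySem.Dict Char Int)).items.foldl
        (fun acc p => acc + p.2 + PySem.Int.floordiv (p.2 * (p.2 - 1)) 2) 0 = _
  rw [PySem.Dict.foldl_insert_getD_add_one_eq_counter, PySem.Dict.items_counter]
  have hfun : (fun (acc : Int) (p : Char × Int) => acc + p.2 + PySem.Int.floordiv (p.2 * (p.2 - 1)) 2)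
      = (fun acc p => acc + (p.2 + PySem.Int.floordiv (p.2 * (p.2 - 1)) 2)) := by
    funext acc p; ring
  rw [hfun, PySem.List.foldl_add, List.map_map, zero_add]
  refine congrArg List.sum (List.map_congr_left ?_)
  intro a _
  simp only [Function.comp]
  exact pv_tri_eq _

-- ===== VERDICT (by name: the statement is the Claim_ definition above) =====
theorem count_distinct_strings_spec : Claim_equal_count_distinct_strings := by
  intro n s _
  unfold Spec_count_distinct_strings count_distinct_strings_alt
  rw [pv_A_eq_sum]
  have hperm : (PySem.List.sorted s.toList (fun x => x) false).Perm s.toList :=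
    PySem.List.sorted_perm _ _ _
  have hpw : (PySem.List.sorted s.toList (fun x => x) false).Pairwise (· ≤ ·) := by
    have := PySem.List.sorted_pairwise s.toList (fun x => x)
    simpa using this
  rw [← pv_runscan_sorted _ hpw]
  have hsetperm : (PySem.Set.ofList s.toList).Perm
      (PySem.Set.ofList (PySem.List.sorted s.toList (fun x => x) false)) := by
    rw [List.perm_ext_iff_of_nodup (PySem.Set.nodup_ofList _) (PySem.Set.nodup_ofList _)]
    intro a
    rw [PySem.Set.mem_ofList, PySem.Set.mem_ofList]
    exact (hperm.mem_iff).symm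
  have hceq : ∀ a ∈ PySem.Set.ofList s.toList,
      PySem.Int.floordiv ((s.toList.count a : Int) * ((s.toList.count a : Int) + 1)) 2
        = PySem.Int.floordiv (((PySem.List.sorted s.toList (fun x => x) false).count a : Int)
            * (((PySem.List.sorted s.toList (fun x => x) false).count a : Int) + 1)) 2 := by
    intro a _
    rw [hperm.count_eq a]
  rw [List.map_congr_left hceq]
  exact (hsetperm.map _).sum_eq
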